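-- pv_equiv track=rewrite | github.com/pfaley/FloWaste-2020Vision | backend/detection/circle_detector.py | is_contained_within_circle
-- ===== SOURCE A (Python) =====
-- import math
--
-- def is_contained_within_circle(cx, cy, cr, rx, ry, rw, rh):
--     points = [
--         (rx, ry),
--         (rx + rw, ry),
--         (rx, ry + rh),
--         (rx + rw, ry + rh)
--     ]
--
--     for i, point in enumerate(points):
--         if not is_point_on_circle(*point, cx, cy, cr):
--             return False
--
--     return True
--
-- def is_point_on_circle(px, py, cx, cy, cr):
--     distance = math.sqrt(((cx - px) ** 2) + ((cy - py) ** 2))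
--     return distance <= cr
-- ===== SOURCE B (Python) =====
-- import math
--
-- def is_contained_within_circle(cx, cy, cr, rx, ry, rw, rh):
--     dx = max(abs(cx - rx), abs(cx - rx - rw))
--     dy = max(abs(cy - ry), abs(cy - ry - rh))
--     return math.sqrt(dx * dx + dy * dy) <= cr
-- ===== Notes on version B (the rewrite author's own statement) =====
-- stated objective: simpler
-- what changed: Replaces the 4-element corner list, the enumerate loop and the per-corner distance helper by a single closed-form farthest-corner computation (dx = max of the two horizontal offsets, dy = max of the two vertical offsets) and one distance test.
-- outside the precondition, e.g. on is_contained_within_circle(0, 0, 67108864, 67108864, 1, 0, 0): A returns True, B returns True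
import Mathlib
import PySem

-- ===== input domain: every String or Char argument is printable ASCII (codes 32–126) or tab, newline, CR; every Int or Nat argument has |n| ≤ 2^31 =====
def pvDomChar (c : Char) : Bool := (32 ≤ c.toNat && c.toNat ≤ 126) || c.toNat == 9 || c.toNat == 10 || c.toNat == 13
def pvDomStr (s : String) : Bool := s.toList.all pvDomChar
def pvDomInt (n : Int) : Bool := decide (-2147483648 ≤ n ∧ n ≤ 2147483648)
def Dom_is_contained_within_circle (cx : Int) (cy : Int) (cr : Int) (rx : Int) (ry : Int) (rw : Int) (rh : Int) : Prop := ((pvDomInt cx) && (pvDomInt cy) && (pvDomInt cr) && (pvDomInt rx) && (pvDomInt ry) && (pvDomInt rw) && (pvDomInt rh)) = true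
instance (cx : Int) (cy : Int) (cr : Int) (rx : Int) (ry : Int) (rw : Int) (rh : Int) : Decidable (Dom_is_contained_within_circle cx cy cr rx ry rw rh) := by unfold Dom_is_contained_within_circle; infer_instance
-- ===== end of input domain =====

-- B replaces A's corner list + per-corner loop + distance helper by one closed-form
-- farthest-corner test (objective: simpler).


-- ===== PORT A =====
-- hand port of `math.sqrt((cx-px)**2 + (cy-py)**2) <= cr` in exact integer form
-- (distance ≤ cr over the reals iff 0 ≤ cr and d² ≤ cr²); exact wherever Pre_ holds,
-- which keeps each corner's d² away from the thin shell around cr² where the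
-- double-precision sqrt result could round across the boundary.
def is_point_on_circle (px : Int) (py : Int) (cx : Int) (cy : Int) (cr : Int) : Bool :=
  decide (0 ≤ cr ∧ (cx - px) ^ 2 + (cy - py) ^ 2 ≤ cr ^ 2)

def is_contained_within_circle (cx : Int) (cy : Int) (cr : Int) (rx : Int) (ry : Int) (rw : Int) (rh : Int) : Bool :=
  let points : List (Int × Int) :=
    [(rx, ry), (rx + rw, ry), (rx, ry + rh), (rx + rw, ry + rh)]
  -- `for i, point in enumerate(points): if not …: return False` / `return True`
  (PySem.List.enumerate points).all (fun ip => is_point_on_circle ip.2.1 ip.2.2 cx cy cr)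

-- ===== PORT B =====
def is_contained_within_circle_alt (cx : Int) (cy : Int) (cr : Int) (rx : Int) (ry : Int) (rw : Int) (rh : Int) : Bool :=
  let dx := max |cx - rx| |cx - rx - rw|
  let dy := max |cy - ry| |cy - ry - rh|
  -- hand port of `math.sqrt(dx*dx + dy*dy) <= cr` in exact integer form (see PORT A comment)
  decide (0 ≤ cr ∧ dx * dx + dy * dy ≤ cr * cr)

-- ===== PRECONDITION & SPEC =====
-- a corner's squared distance d² is "safe" when it equals cr² or is relatively far
-- (more than 2⁻⁴⁸) from cr²: there the float sqrt(d²) ≤ cr test provably agrees with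
-- the exact integer test the ports use
def pvSafeCorner (cx : Int) (cy : Int) (cr : Int) (px : Int) (py : Int) : Prop :=
  (cx - px) ^ 2 + (cy - py) ^ 2 = cr * cr ∨
    cr * cr < 2 ^ 48 * |(cx - px) ^ 2 + (cy - py) ^ 2 - cr * cr|

-- Pre_ excludes only inputs where some corner's squared distance lies in the thin shell
-- (0 < |d² - cr²| ≤ cr²/2⁴⁸) around the circle, where Python's double-precision
-- sqrt comparison may round across the boundary and no integer port can be exact;
-- both Pythons agree there (they compute the same floats), only the ports' exactness needs it.
def Pre_is_contained_within_circle (cx : Int) (cy : Int) (cr : Int) (rx : Int) (ry : Int) (rw : Int) (rh : Int) : Prop :=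
  cr < 0 ∨
    (pvSafeCorner cx cy cr rx ry ∧ pvSafeCorner cx cy cr (rx + rw) ry ∧
      pvSafeCorner cx cy cr rx (ry + rh) ∧ pvSafeCorner cx cy cr (rx + rw) (ry + rh))
instance (cx : Int) (cy : Int) (cr : Int) (rx : Int) (ry : Int) (rw : Int) (rh : Int) : Decidable (Pre_is_contained_within_circle cx cy cr rx ry rw rh) := by unfold Pre_is_contained_within_circle pvSafeCorner; infer_instance

def pvWitness_is_contained_within_circle : Int × Int × Int × Int × Int × Int × Int := (0, 0, 5, 0, 0, 3, 4)

def Spec_is_contained_within_circle (cx : Int) (cy : Int) (cr : Int) (rx : Int) (ry : Int) (rw : Int) (rh : Int) (out : Bool) : Prop := out = is_contained_within_circle_alt cx cy cr rx ry rw rh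
instance (cx : Int) (cy : Int) (cr : Int) (rx : Int) (ry : Int) (rw : Int) (rh : Int) (out : Bool) : Decidable (Spec_is_contained_within_circle cx cy cr rx ry rw rh out) := by unfold Spec_is_contained_within_circle; infer_instance

-- ===== CLAIM =====
def Claim_equal_is_contained_within_circle : Prop := ∀ (cx : Int) (cy : Int) (cr : Int) (rx : Int) (ry : Int) (rw : Int) (rh : Int), Dom_is_contained_within_circle cx cy cr rx ry rw rh → Pre_is_contained_within_circle cx cy cr rx ry rw rh → Spec_is_contained_within_circle cx cy cr rx ry rw rh (is_contained_within_circle cx cy cr rx ry rw rh)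

-- ===== LEMMAS AND PROOFS =====

-- the square of the max of two absolute values is the max of the squares
theorem pv_sq_max_abs (u v : Int) :
    max |u| |v| * max |u| |v| = max (u * u) (v * v) := by
  rcases le_total |u| |v| with h | h
  · rw [max_eq_right h, max_eq_right
      (by simpa [abs_mul_abs_self] using mul_self_le_mul_self (abs_nonneg u) h),
      abs_mul_abs_self]
  · rw [max_eq_left h, max_eq_left
      (by simpa [abs_mul_abs_self] using mul_self_le_mul_self (abs_nonneg v) h),
      abs_mul_abs_self]

-- the two ports agree on every input (the equivalence is purely integer-arithmetical)
theorem pv_ports_agree (cx cy cr rx ry rw rh : Int) :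
    is_contained_within_circle cx cy cr rx ry rw rh
      = is_contained_within_circle_alt cx cy cr rx ry rw rh := by
  rw [Bool.eq_iff_iff]
  simp only [is_contained_within_circle, is_contained_within_circle_alt, is_point_on_circle,
    PySem.List.enumerate_cons, PySem.List.enumerate_nil, List.all_cons, List.all_nil,
    Bool.and_true, Bool.and_eq_true, decide_eq_true_eq, pv_sq_max_abs, pow_two]
  have e1 : cx - (rx + rw) = cx - rx - rw := by ring
  have e2 : cy - (ry + rh) = cy - ry - rh := by ring
  rw [e1, e2]
  rcases le_total ((cx - rx) * (cx - rx)) ((cx - rx - rw) * (cx - rx - rw)) with h1 | h1 <;>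
    rcases le_total ((cy - ry) * (cy - ry)) ((cy - ry - rh) * (cy - ry - rh)) with h2 | h2 <;>
    [rw [max_eq_right h1, max_eq_right h2]; rw [max_eq_right h1, max_eq_left h2];
     rw [max_eq_left h1, max_eq_right h2]; rw [max_eq_left h1, max_eq_left h2]] <;>
    constructor <;> intro hh <;> omega

-- ===== VERDICT =====
theorem is_contained_within_circle_spec : Claim_equal_is_contained_within_circle := by
  intro cx cy cr rx ry rw rh _ _
  exact pv_ports_agree cx cy cr rx ry rw rh
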